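-- pv_equiv track=rewrite | github.com/Acidosulus/btf | btf.py | Get_File_name_from_First_String
-- ===== SOURCE A (Python) =====
-- def Delete_from_String_all_Characters_Unsuitable_For_FileName(pc:str):
--     pc = pc.strip()
--     lc_suitable_simbols = 'qwertyuiopasdfghjklzxcvbnm'
--     lc_suitable_simbols = lc_suitable_simbols + lc_suitable_simbols.upper() + ',.1234567890-!_ '
--     lc_result = ''
--     for ch in pc:
--         if ch in lc_suitable_simbols:
--             lc_result = lc_result + ch
--     return lc_result.strip()
--
-- def Get_File_name_from_First_String(pc_source:str):
--     ll = pc_source.split('\n')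
--     lc_result = ''
--     for lc in ll:
--         lc_result_cadidate = Delete_from_String_all_Characters_Unsuitable_For_FileName(lc.strip())
--         if len(lc_result_cadidate)>5:
--             lc_result = lc_result_cadidate
--             break
--     return lc_result
-- ===== SOURCE B (Python) =====
-- import re
--
-- _UNSUITABLE = re.compile(r'[^a-zA-Z0-9,.!_ -]')
--
-- def Get_File_name_from_First_String(pc_source: str):
--     return next((c for line in pc_source.split('\n')
--                  if len(c := _UNSUITABLE.sub('', line).strip()) > 5), '')
-- ===== Notes on version B (the rewrite author's own statement) =====
-- stated objective: faster
-- what changed: The character-by-character membership/accumulator loop inside a helper plus an explicit break-loop over lines is replaced by a single regex-substitution (character-class filter) per line and a next()-over-generator returning the first cleaned candidate longer than 5, dropping the redundant double strip.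
import Mathlib
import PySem

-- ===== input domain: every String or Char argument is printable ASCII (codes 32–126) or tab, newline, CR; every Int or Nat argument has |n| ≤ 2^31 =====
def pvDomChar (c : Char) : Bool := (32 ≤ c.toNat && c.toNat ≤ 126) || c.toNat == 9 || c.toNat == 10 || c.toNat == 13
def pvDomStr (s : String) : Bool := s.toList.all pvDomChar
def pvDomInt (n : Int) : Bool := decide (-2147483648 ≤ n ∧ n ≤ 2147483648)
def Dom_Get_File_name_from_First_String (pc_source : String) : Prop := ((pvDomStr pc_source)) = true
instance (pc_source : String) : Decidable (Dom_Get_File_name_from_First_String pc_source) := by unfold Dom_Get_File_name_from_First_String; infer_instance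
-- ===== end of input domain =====

-- B replaces A's per-character membership loop and explicit break-loop with a regex-class filter per line
-- and a first-match scan (more idiomatic); equivalence of the two is proved below.

-- ===== PORT A =====
-- the suitable-characters string A builds: lowercase ++ uppercase ++ ",.1234567890-!_ "
def pvSuitableSimbols : List Char :=
  let lc := "qwertyuiopasdfghjklzxcvbnm".toList
  lc ++ PySem.Chars.upper lc ++ ",.1234567890-!_ ".toList

-- Delete_from_String_all_Characters_Unsuitable_For_FileName, literally
def pvDeleteUnsuitable (pc : String) : String :=
  let cs := PySem.Chars.strip pc.toList
  let res := cs.foldl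
    (fun acc ch => if PySem.Chars.isIn [ch] pvSuitableSimbols then acc ++ [ch] else acc)
    ([] : List Char)
  String.ofList (PySem.Chars.strip res)

-- the for-loop over lines with break (returns '' if no line qualifies)
def pvLoopA : List (List Char) → String
  | [] => ""
  | lc :: rest =>
    let cand := pvDeleteUnsuitable (String.ofList (PySem.Chars.strip lc))
    if 5 < PySem.Str.len cand then cand else pvLoopA rest

def Get_File_name_from_First_String (pc_source : String) : String :=
  pvLoopA (PySem.Chars.splitOn pc_source.toList "\n".toList)

-- ===== PORT B =====
-- the regex class [a-zA-Z0-9,.!_ -] expanded to its (finite, ASCII) character set;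
-- re.sub deleting the complement of the class is exactly List.filter by class membership.
def pvKeepSet : List Char :=
  "abcdefghijklmnopqrstuvwxyzABCDEFGHIJKLMNOPQRSTUVWXYZ0123456789,.!_ -".toList

-- clean(line) = _UNSUITABLE.sub('', line).strip()
def pvClean (line : List Char) : List Char :=
  PySem.Chars.strip (line.filter (fun c => pvKeepSet.contains c))

-- next((c for line in pc_source.split('\n') if len(c := clean(line)) > 5), '')
def Get_File_name_from_First_String_alt (pc_source : String) : String :=
  (((PySem.Chars.splitOn pc_source.toList "\n".toList).findSome?
      (fun line =>
        let c := pvClean line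
        if 5 < c.length then some (String.ofList c) else none)).getD "")

-- ===== PRECONDITION & SPEC =====
def Spec_Get_File_name_from_First_String (pc_source : String) (out : String) : Prop := out = Get_File_name_from_First_String_alt pc_source
instance (pc_source : String) (out : String) : Decidable (Spec_Get_File_name_from_First_String pc_source out) := by unfold Spec_Get_File_name_from_First_String; infer_instance

-- ===== CLAIM (what is proved, stated in full; the proofs are below) =====
def Claim_equal_Get_File_name_from_First_String : Prop := ∀ (pc_source : String), Dom_Get_File_name_from_First_String pc_source → Spec_Get_File_name_from_First_String pc_source (Get_File_name_from_First_String pc_source)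

-- ===== LEMMAS AND PROOFS =====

-- dropping an all-whitespace prefix/suffix commutes with strip
theorem pv_lstrip_space_append (w y : List Char)
    (h : ∀ c ∈ w, PySem.Chars.isspace c = true) :
    PySem.Chars.lstrip (w ++ y) = PySem.Chars.lstrip y := by
  simp [PySem.Chars.lstrip, List.dropWhile_append, List.dropWhile_eq_nil_iff.mpr h]

theorem pv_rstrip_append_space (y w : List Char)
    (h : ∀ c ∈ w, PySem.Chars.isspace c = true) :
    PySem.Chars.rstrip (y ++ w) = PySem.Chars.rstrip y := by
  have h' : ∀ c ∈ w.reverse, PySem.Chars.isspace c = true := by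
    intro c hc; exact h c (List.mem_reverse.mp hc)
  simp [PySem.Chars.rstrip, List.reverse_append, List.dropWhile_append,
        List.dropWhile_eq_nil_iff.mpr h']

theorem pv_strip_space_append (w y : List Char)
    (h : ∀ c ∈ w, PySem.Chars.isspace c = true) :
    PySem.Chars.strip (w ++ y) = PySem.Chars.strip y := by
  simp [PySem.Chars.strip, pv_lstrip_space_append w y h]

theorem pv_strip_append_space (y w : List Char)
    (h : ∀ c ∈ w, PySem.Chars.isspace c = true) :
    PySem.Chars.strip (y ++ w) = PySem.Chars.strip y := by
  unfold PySem.Chars.strip PySem.Chars.lstrip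
  rw [List.dropWhile_append]
  by_cases hy : (List.dropWhile PySem.Chars.isspace y).isEmpty
  · have hy' : List.dropWhile PySem.Chars.isspace y = [] := List.isEmpty_iff.mp hy
    have hw : List.dropWhile PySem.Chars.isspace w = [] := List.dropWhile_eq_nil_iff.mpr h
    simp [hy', hw]
  · simp only [hy, Bool.false_eq_true, if_false]
    exact pv_rstrip_append_space _ w h

-- stripping before a filter is redundant under a final strip (any predicate p)
theorem pv_strip_filter_lstrip (p : Char → Bool) (z : List Char) :
    PySem.Chars.strip (List.filter p (PySem.Chars.lstrip z)) =
      PySem.Chars.strip (List.filter p z) := by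
  conv_rhs => rw [← List.takeWhile_append_dropWhile (p := PySem.Chars.isspace) (l := z)]
  rw [List.filter_append]
  rw [pv_strip_space_append]
  · rfl
  · intro c hc
    have := List.mem_filter.mp hc
    exact List.mem_takeWhile_imp this.1

theorem pv_strip_filter_rstrip (p : Char → Bool) (z : List Char) :
    PySem.Chars.strip (List.filter p (PySem.Chars.rstrip z)) =
      PySem.Chars.strip (List.filter p z) := by
  have hz : z = PySem.Chars.rstrip z ++ (List.takeWhile PySem.Chars.isspace z.reverse).reverse := by
    have := List.takeWhile_append_dropWhile (p := PySem.Chars.isspace) (l := z.reverse)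
    calc z = z.reverse.reverse := (List.reverse_reverse z).symm
    _ = (List.takeWhile PySem.Chars.isspace z.reverse ++ List.dropWhile PySem.Chars.isspace z.reverse).reverse := by rw [this]
    _ = _ := by rw [List.reverse_append]; rfl
  conv_rhs => rw [hz]
  rw [List.filter_append, pv_strip_append_space]
  intro c hc
  have := List.mem_filter.mp hc
  exact List.mem_takeWhile_imp (List.mem_reverse.mp this.1)

theorem pv_strip_filter_strip (p : Char → Bool) (z : List Char) :
    PySem.Chars.strip (List.filter p (PySem.Chars.strip z)) =
      PySem.Chars.strip (List.filter p z) := by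
  show PySem.Chars.strip (List.filter p (PySem.Chars.rstrip (PySem.Chars.lstrip z))) = _
  rw [pv_strip_filter_rstrip, pv_strip_filter_lstrip]

theorem pv_strip_idem (z : List Char) :
    PySem.Chars.strip (PySem.Chars.strip z) = PySem.Chars.strip z := by
  have h := pv_strip_filter_strip (fun _ => true) z
  simpa using h

-- A's suitable-characters string holds exactly the characters of B's regex class
theorem pv_mem_suitable (c : Char) :
    PySem.Chars.isIn [c] pvSuitableSimbols = pvKeepSet.contains c := by
  have hperm : pvSuitableSimbols.Perm pvKeepSet := by decide
  have h1 : PySem.Chars.isIn [c] pvSuitableSimbols = true ↔ c ∈ pvKeepSet := by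
    rw [PySem.Chars.isIn_iff_infix, List.singleton_infix_iff]
    exact hperm.mem_iff
  have h2 : pvKeepSet.contains c = true ↔ c ∈ pvKeepSet := by simp
  rw [Bool.eq_iff_iff, h1, h2]

-- A's candidate for one (already once-stripped) line equals B's cleaned line
theorem pv_cand_eq (lc : List Char) :
    pvDeleteUnsuitable (String.ofList (PySem.Chars.strip lc)) = String.ofList (pvClean lc) := by
  unfold pvDeleteUnsuitable pvClean
  have hfold : ∀ (z : List Char),
      z.foldl (fun acc ch => if PySem.Chars.isIn [ch] pvSuitableSimbols then acc ++ [ch] else acc)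
        ([] : List Char)
        = z.filter (fun c => pvKeepSet.contains c) := by
    intro z
    have := PySem.List.foldl_append_if (fun ch => PySem.Chars.isIn [ch] pvSuitableSimbols)
      (fun x => x) z []
    simp only [List.nil_append, List.map_id_fun', id] at this
    rw [this]
    congr 1
    funext ch
    exact pv_mem_suitable ch
  show String.ofList (PySem.Chars.strip (List.foldl _ _ (PySem.Chars.strip (String.ofList (PySem.Chars.strip lc)).toList))) = _
  have htl : (String.ofList (PySem.Chars.strip lc)).toList = PySem.Chars.strip lc :=
    String.toList_ofList
  rw [htl, pv_strip_idem, hfold, pv_strip_filter_strip]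

-- the break-loop over lines equals the first-match generator
theorem pv_loop_eq (ll : List (List Char)) :
    pvLoopA ll =
      ((ll.findSome? (fun line =>
          let c := pvClean line
          if 5 < c.length then some (String.ofList c) else none)).getD "") := by
  induction ll with
  | nil => rfl
  | cons lc rest ih =>
    rw [pvLoopA, List.findSome?_cons]
    simp only [pv_cand_eq lc]
    by_cases h : 5 < (pvClean lc).length
    · simp [h]
    · simp [h, ih]

-- ===== VERDICT (by name: the statement is the Claim_ definition above) =====
theorem Get_File_name_from_First_String_spec : Claim_equal_Get_File_name_from_First_String := by
  intro pc_source _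
  unfold Spec_Get_File_name_from_First_String
  unfold Get_File_name_from_First_String Get_File_name_from_First_String_alt
  exact pv_loop_eq _
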